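-- pv_equiv track=rewrite | github.com/Fleezyflo/moh-time-os | lib/security/headers.py | is_cors_allowed
-- ===== SOURCE A (Python) =====
-- def is_cors_allowed(origin: str, allowed_origins: list[str]) -> bool:
--     """
--     Check if an origin is allowed by CORS policy.
--
--     Supports wildcard patterns like "http://localhost:*" and exact matches.
--
--     Args:
--         origin: Origin header from request
--         allowed_origins: List of allowed origins
--
--     Returns:
--         True if origin is allowed
--     """
--     if "*" in allowed_origins:
--         return True
--
--     for allowed in allowed_origins:
--         if allowed == "*":
--             return True
--         if allowed.endswith("*"):
--             # Handle wildcard patterns like "http://localhost:*"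
--             prefix = allowed[:-1]  # Remove the "*"
--             if origin.startswith(prefix):
--                 return True
--         elif allowed == origin:
--             return True
--
--     return False
-- ===== SOURCE B (Python) =====
-- def is_cors_allowed(origin: str, allowed_origins: list[str]) -> bool:
--     """Character-by-character trailing-star glob matcher instead of slice/startswith tests."""
--     def match(o: str, p: str) -> bool:
--         i, lo, lp = 0, len(o), len(p)
--         while True:
--             # remaining pattern p[i:] against remaining origin o[i:]
--             if i == lp - 1 and p[i] == "*":
--                 return True
--             if i >= lo or i >= lp:
--                 return o[i:] == p[i:]
--             if o[i] != p[i]: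
--                 return False
--             i += 1
--     return any(match(origin, a) for a in allowed_origins)
-- ===== Notes on version B (the rewrite author's own statement) =====
-- stated objective: alternative
-- what changed: B replaces A's per-pattern endswith/slice/startswith string-operation tests (plus the '*'-membership pre-pass) by a recursive character-by-character glob matcher: walk origin and pattern together, a pattern reduced to '*' matches any remaining origin, otherwise characters must agree one by one.
import Mathlib
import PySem

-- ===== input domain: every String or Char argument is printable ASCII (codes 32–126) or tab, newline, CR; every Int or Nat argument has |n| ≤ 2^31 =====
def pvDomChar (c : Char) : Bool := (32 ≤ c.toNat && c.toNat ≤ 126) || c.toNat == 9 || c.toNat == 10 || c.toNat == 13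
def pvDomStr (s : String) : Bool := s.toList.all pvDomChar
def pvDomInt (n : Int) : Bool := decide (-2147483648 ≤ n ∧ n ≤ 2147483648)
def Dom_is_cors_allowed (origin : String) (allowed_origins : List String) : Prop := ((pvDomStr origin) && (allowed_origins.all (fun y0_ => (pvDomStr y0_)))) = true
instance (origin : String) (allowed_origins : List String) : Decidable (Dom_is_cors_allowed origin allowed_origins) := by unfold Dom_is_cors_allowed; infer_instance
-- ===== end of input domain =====

-- B replaces A's endswith/slice/startswith tests by a recursive character-by-character trailing-star glob matcher: an alternative of the same cost (not faster).

-- ===== PORT A =====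
-- literal port of A's for-loop (branch order preserved)
def corsLoopA (origin : String) : List String → Bool
  | [] => false
  | allowed :: rest =>
    if allowed == "*" then true
    else if PySem.Str.endswith allowed "*" then
      if PySem.Str.startswith origin (PySem.Str.slice allowed none (some (-1))) then true
      else corsLoopA origin rest
    else if allowed == origin then true
    else corsLoopA origin rest

def is_cors_allowed (origin : String) (allowed_origins : List String) : Bool :=
  if allowed_origins.contains "*" then true
  else corsLoopA origin allowed_origins

-- ===== PORT B =====
-- Source B's recursive char-by-char matcher: pattern "*" matches any rest; empty vs empty
-- compares equal; otherwise first characters must agree and the tails must match.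
def charMatch (o p : List Char) : Bool :=
  if p = ['*'] then true
  else
    match o, p with
    | [], q => q.isEmpty
    | _ :: _, [] => false
    | c :: o', d :: p' => (c == d) && charMatch o' p'
termination_by o.length

def is_cors_allowed_alt (origin : String) (allowed_origins : List String) : Bool :=
  allowed_origins.any (fun a => charMatch origin.toList a.toList)

-- ===== PRECONDITION & SPEC =====
def Spec_is_cors_allowed (origin : String) (allowed_origins : List String) (out : Bool) : Prop := out = is_cors_allowed_alt origin allowed_origins
instance (origin : String) (allowed_origins : List String) (out : Bool) : Decidable (Spec_is_cors_allowed origin allowed_origins out) := by unfold Spec_is_cors_allowed; infer_instance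

-- ===== CLAIM (what is proved, stated in full; the proofs are below) =====
def Claim_equal_is_cors_allowed : Prop := ∀ (origin : String) (allowed_origins : List String), Dom_is_cors_allowed origin allowed_origins → Spec_is_cors_allowed origin allowed_origins (is_cors_allowed origin allowed_origins)

-- ===== LEMMAS AND PROOFS =====

-- "does pattern a match origin?" — A's per-pattern test
def corsMatch (origin a : String) : Bool :=
  if PySem.Str.endswith a "*" then
    PySem.Str.startswith origin (PySem.Str.slice a none (some (-1)))
  else a == origin

-- unfolding equations for charMatch (cited by the proofs below)
theorem charMatch_nil (p : List Char) (h : p ≠ ['*']) :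
    charMatch [] p = p.isEmpty := by
  rw [charMatch.eq_def, if_neg h]

theorem charMatch_cons_nil (c : Char) (o' : List Char) :
    charMatch (c :: o') [] = false := by
  rw [charMatch.eq_def, if_neg (by simp : ([] : List Char) ≠ ['*'])]

theorem charMatch_cons (c d : Char) (o' p' : List Char) (h : d :: p' ≠ ['*']) :
    charMatch (c :: o') (d :: p') = ((c == d) && charMatch o' p') := by
  rw [charMatch.eq_def, if_neg h]

theorem charMatch_of_star (o : List Char) : charMatch o ['*'] = true := by
  rw [charMatch.eq_def, if_pos rfl]

-- B's char matcher computes exactly A's per-pattern test, at the List Char level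
theorem charMatch_eq (o p : List Char) :
    charMatch o p =
      (if ['*'] <:+ p then decide (p.dropLast <+: o) else decide (o = p)) := by
  induction o generalizing p with
  | nil =>
    by_cases hp : p = ['*']
    · subst hp; rw [charMatch_of_star]; simp
    · rw [charMatch_nil p hp]
      match p with
      | [] => simp
      | d :: p' =>
        simp only [List.isEmpty_cons]
        by_cases hs : ['*'] <:+ d :: p'
        · rw [if_pos hs]
          have hne : (d :: p').dropLast ≠ [] := by
            intro hd
            have hlen := congrArg List.length hd
            simp [List.length_dropLast] at hlen
            subst hlen
            rcases List.suffix_cons_iff.mp hs with h | h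
            · exact hp h.symm
            · simp at h
          simp [List.prefix_nil, hne]
        · rw [if_neg hs]; simp
  | cons c o' ih =>
    by_cases hp : p = ['*']
    · subst hp; rw [charMatch_of_star]; simp
    · match p with
      | [] => rw [charMatch_cons_nil]; simp
      | [d] =>
        have hd : d ≠ '*' := fun h => hp (by rw [h])
        have hs : ¬ (['*'] <:+ [d]) := by
          intro h
          rcases List.suffix_cons_iff.mp h with h | h
          · exact hd (List.cons_eq_cons.mp h.symm).1
          · simp at h
        rw [charMatch_cons c d o' [] hp, ih]
        rw [if_neg (by simp : ¬ (['*'] <:+ ([] : List Char))), if_neg hs]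
        simp [Bool.beq_eq_decide_eq]
      | d :: e :: p'' =>
        have hs : (['*'] <:+ d :: e :: p'') ↔ (['*'] <:+ e :: p'') := by
          rw [List.suffix_cons_iff]
          constructor
          · rintro (h | h)
            · exact absurd (congrArg List.length h) (by simp)
            · exact h
          · exact Or.inr
        rw [charMatch_cons c d o' (e :: p'') hp, ih]
        by_cases h : ['*'] <:+ e :: p''
        · rw [if_pos h, if_pos (hs.mpr h)]
          have hdl : (d :: e :: p'').dropLast = d :: (e :: p'').dropLast := by simp
          rw [hdl]
          simp [List.cons_prefix_cons, Bool.beq_eq_decide_eq, eq_comm]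
        · rw [if_neg h, if_neg (fun hh => h (hs.mp hh))]
          simp [Bool.beq_eq_decide_eq]

theorem alt_match_eq (origin a : String) :
    charMatch origin.toList a.toList = corsMatch origin a := by
  rw [charMatch_eq]
  unfold corsMatch
  have hend : PySem.Str.endswith a "*" = PySem.Chars.endswith a.toList ['*'] :=
    PySem.Str.endswith_eq a "*"
  by_cases hs : ['*'] <:+ a.toList
  · rw [if_pos hs]
    rw [if_pos (by rw [hend]; exact (PySem.Chars.endswith_iff _ _).mpr hs)]
    have hsw : PySem.Str.startswith origin (PySem.Str.slice a none (some (-1)))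
        = PySem.Chars.startswith origin.toList a.toList.dropLast := by
      rw [PySem.Str.startswith_eq, PySem.Str.slice_to_neg_one]
    rw [hsw]
    by_cases hpre : a.toList.dropLast <+: origin.toList
    · rw [(PySem.Chars.startswith_iff _ _).mpr hpre]; simp [hpre]
    · simp only [hpre, decide_false]
      cases hb : PySem.Chars.startswith origin.toList a.toList.dropLast
      · rfl
      · exact absurd ((PySem.Chars.startswith_iff _ _).mp hb) hpre
  · rw [if_neg hs]
    have hef : PySem.Str.endswith a "*" = false := by
      rw [hend]
      cases hb : PySem.Chars.endswith a.toList ['*']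
      · rfl
      · exact absurd ((PySem.Chars.endswith_iff _ _).mp hb) hs
    rw [hef]
    simp only [Bool.false_eq_true, if_false]
    have hiff : origin.toList = a.toList ↔ a = origin :=
      ⟨fun h => (String.toList_inj.mp h).symm, fun h => by rw [h]⟩
    simp [hiff, Bool.beq_eq_decide_eq, eq_comm]

theorem corsMatch_star (origin : String) : corsMatch origin "*" = true := by
  rw [← alt_match_eq]
  exact charMatch_of_star origin.toList

theorem corsLoopA_eq_any (origin : String) (xs : List String) :
    corsLoopA origin xs = xs.any (corsMatch origin) := by
  induction xs with
  | nil => rfl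
  | cons a rest ih =>
    by_cases hstar : a = "*"
    · subst hstar
      simp [corsLoopA, List.any_cons, corsMatch_star]
    · simp only [corsLoopA, List.any_cons, corsMatch, ← ih]
      have hne : (a == "*") = false := by simpa using hstar
      rw [hne]
      split_ifs <;> simp_all

-- ===== VERDICT (by name: the statement is the Claim_ definition above) =====
theorem is_cors_allowed_spec : Claim_equal_is_cors_allowed := by
  intro origin xs _
  unfold Spec_is_cors_allowed is_cors_allowed is_cors_allowed_alt
  rw [corsLoopA_eq_any]
  have hfun : corsMatch origin = fun a => charMatch origin.toList a.toList :=
    funext fun a => (alt_match_eq origin a).symm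
  split_ifs with h
  · symm
    rw [List.any_eq_true]
    refine ⟨"*", by simpa using h, ?_⟩
    show charMatch origin.toList "*".toList = true
    simpa using charMatch_of_star origin.toList
  · rw [hfun]
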